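-- pv_equiv track=rewrite | github.com/AlekJaworski/island_counting | islands/island_finding/file_checking.py | initialize_colours
-- ===== SOURCE A (Python) =====
-- from typing import Iterable
--
-- def initialize_colours(iterable: Iterable[int]):
--     temp_colour = 0
--     res = []
--     x_prev = 0
--     for x in iterable:
--         if x_prev == 0 and x == 1:
--             temp_colour += 1
--         if x == 0:
--             res.append(0)
--         else:
--             res.append(temp_colour)
--         x_prev = x
--     return res
-- ===== SOURCE B (Python) =====
-- from itertools import groupby
--
-- def initialize_colours(iterable):
--     res = []
--     colour = 0
--     prev = 0
--     for v, grp in groupby(list(iterable)):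
--         length = sum(1 for _ in grp)
--         if v == 0:
--             res.extend([0] * length)
--         else:
--             if v == 1 and prev == 0:
--                 colour += 1
--             res.extend([colour] * length)
--         prev = v
--     return res
-- ===== Notes on version B (the rewrite author's own statement) =====
-- stated objective: idiomatic
-- what changed: B groups the input into maximal runs of equal values with itertools.groupby and emits each run's colour block at once, instead of A's element-by-element loop tracking the previous element.
import Mathlib
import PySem

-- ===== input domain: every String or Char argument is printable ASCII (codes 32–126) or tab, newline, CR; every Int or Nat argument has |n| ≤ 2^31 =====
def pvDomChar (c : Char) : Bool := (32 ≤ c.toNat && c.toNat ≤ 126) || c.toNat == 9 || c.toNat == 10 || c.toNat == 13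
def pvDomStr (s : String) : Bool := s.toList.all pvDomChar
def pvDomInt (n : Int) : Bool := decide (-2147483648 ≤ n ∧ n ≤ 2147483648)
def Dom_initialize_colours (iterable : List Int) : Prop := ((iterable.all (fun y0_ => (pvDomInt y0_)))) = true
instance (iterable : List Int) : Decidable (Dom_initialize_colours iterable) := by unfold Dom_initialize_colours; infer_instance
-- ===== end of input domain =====

-- B replaces A's element-by-element loop by grouping the input into maximal runs (itertools.groupby) and emitting each run's colour block at once; objective: a more idiomatic decomposition, same O(n) cost.


-- ===== PORT A =====
-- element-by-element loop: state (temp_colour, res, x_prev), exactly A's loop body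
def pvALoop (colour : Int) (res : List Int) (prev : Int) : List Int → List Int
  | [] => res
  | x :: xs =>
    let colour := if prev == 0 && x == 1 then colour + 1 else colour
    let res := if x == 0 then res ++ [0] else res ++ [colour]
    pvALoop colour res x xs

def initialize_colours (iterable : List Int) : List Int :=
  pvALoop 0 [] 0 iterable

-- ===== PORT B =====
-- itertools.groupby: maximal runs of equal consecutive values, as (value, length)
def pvGroupRuns : List Int → List (Int × Nat)
  | [] => []
  | x :: xs =>
    (x, (xs.takeWhile (· == x)).length + 1) :: pvGroupRuns (xs.dropWhile (· == x))
  termination_by xs => xs.length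
  decreasing_by simpa using Nat.lt_succ_of_le (List.length_dropWhile_le (· == x) xs)

-- loop over the groups: state (res, colour, prev), exactly Source B's loop body
def pvBLoop (res : List Int) (colour : Int) (prev : Int) : List (Int × Nat) → List Int
  | [] => res
  | (v, len) :: rs =>
    if v == 0 then
      pvBLoop (res ++ List.replicate len 0) colour v rs
    else
      let colour := if v == 1 && prev == 0 then colour + 1 else colour
      pvBLoop (res ++ List.replicate len colour) colour v rs

def initialize_colours_alt (iterable : List Int) : List Int :=
  pvBLoop [] 0 0 (pvGroupRuns iterable)

-- ===== PRECONDITION & SPEC =====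
def Spec_initialize_colours (iterable : List Int) (out : List Int) : Prop := out = initialize_colours_alt iterable
instance (iterable : List Int) (out : List Int) : Decidable (Spec_initialize_colours iterable out) := by unfold Spec_initialize_colours; infer_instance

-- ===== CLAIM (what is proved, stated in full; the proofs are below) =====
def Claim_equal_initialize_colours : Prop := ∀ (iterable : List Int), Dom_initialize_colours iterable → Spec_initialize_colours iterable (initialize_colours iterable)

-- ===== LEMMAS AND PROOFS =====

-- A's loop only appends to res
theorem pvALoop_append (colour : Int) (res : List Int) (prev : Int) (xs : List Int) :
    pvALoop colour res prev xs = res ++ pvALoop colour [] prev xs := by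
  induction xs generalizing colour res prev with
  | nil => simp [pvALoop]
  | cons x xs ih =>
    simp only [pvALoop]
    rw [ih, ih (res := if x == 0 then [] ++ [0] else [] ++ [_])]
    split <;> simp

-- B's loop only appends to res
theorem pvBLoop_append (res : List Int) (colour prev : Int) (rs : List (Int × Nat)) :
    pvBLoop res colour prev rs = res ++ pvBLoop [] colour prev rs := by
  induction rs generalizing res colour prev with
  | nil => simp [pvBLoop]
  | cons r rs ih =>
    obtain ⟨v, len⟩ := r
    simp only [pvBLoop]
    split
    · rw [ih, ih (res := [] ++ _)]; simp
    · rw [ih, ih (res := [] ++ _)]; simp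

-- inside a run (every element = prev), A's loop never bumps and emits a constant block
theorem pvALoop_const (colour v : Int) (t d : List Int) (h : ∀ y ∈ t, y = v) :
    pvALoop colour [] v (t ++ d) =
      List.replicate t.length (if v = 0 then 0 else colour) ++ pvALoop colour [] v d := by
  induction t with
  | nil => simp
  | cons y t ih =>
    have hy : y = v := h y (by simp)
    subst hy
    simp only [List.cons_append, pvALoop]
    have hb : (y == 0 && y == 1) = false := by
      by_cases h0 : y = 0 <;> simp [h0]
    simp only [hb, Bool.false_eq_true, if_false]
    rw [pvALoop_append]
    rw [ih (fun z hz => h z (by simp [hz]))]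
    by_cases h0 : y = 0 <;> simp [h0, List.replicate_succ]

-- main: A's loop from any state equals B's loop over the runs from that state
theorem pvMain (n : Nat) : ∀ (xs : List Int), xs.length ≤ n → ∀ (colour prev : Int),
    pvALoop colour [] prev xs = pvBLoop [] colour prev (pvGroupRuns xs) := by
  induction n with
  | zero =>
    intro xs h colour prev
    have : xs = [] := List.eq_nil_of_length_eq_zero (Nat.le_zero.mp h)
    subst this; simp [pvALoop, pvGroupRuns, pvBLoop]
  | succ n ih =>
    intro xs h colour prev
    match xs with
    | [] => simp [pvALoop, pvGroupRuns, pvBLoop]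
    | x :: xs =>
      simp only [pvGroupRuns, pvBLoop, pvALoop]
      set t := xs.takeWhile (· == x) with ht
      set d := xs.dropWhile (· == x) with hd
      have hsplit : xs = t ++ d := (List.takeWhile_append_dropWhile).symm
      have hmem : ∀ y ∈ t, y = x := fun y hy => by
        have := List.mem_takeWhile_imp hy; simpa using this
      have hdlen : d.length ≤ n := by
        have h1 : d.length ≤ xs.length := List.length_dropWhile_le (· == x) xs
        simp only [List.length_cons] at h
        omega
      set colour' := if prev == 0 && x == 1 then colour + 1 else colour with hc
      rw [pvALoop_append]
      conv_lhs => rw [hsplit]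
      rw [pvALoop_const colour' x t d hmem, ih d hdlen colour' x]
      by_cases hx0 : x = 0
      · subst hx0
        have hcol : colour' = colour := by simp [hc]
        rw [hcol, pvBLoop_append (res := [] ++ List.replicate (t.length + 1) (0 : Int))]
        simp [List.replicate_succ]
      · have hcc : (if x == 1 && prev == 0 then colour + 1 else colour) = colour' := by
          simp only [hc, Bool.and_comm]
        rw [hcc, pvBLoop_append (res := [] ++ List.replicate (t.length + 1) colour')]
        simp [hx0, List.replicate_succ]

-- ===== VERDICT (by name: the statement is the Claim_ definition above) =====
theorem initialize_colours_spec : Claim_equal_initialize_colours := by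
  intro xs _
  show pvALoop 0 [] 0 xs = initialize_colours_alt xs
  exact pvMain xs.length xs le_rfl 0 0
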